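-- pv_equiv track=rewrite | github.com/addinkevin/programmingchallenges | HackerRank/Algorithms/DynamicProgramming/sherlockAndCost.py | sherlockAndCost
-- ===== SOURCE A (Python) =====
-- def getDiff(solution):
--     diff = 0
--     for i in range(1, len(solution)):
--         diff += abs(solution[i] - solution[i - 1])
--
--     return diff
--
-- def sherlockAndCost(array):
--     if len(array) == 1:
--         return array[0]
--
--     solution1 = [1 if i % 2 == 0 else array[i] for i in range(len(array))]
--     solution2 = [1 if i % 2 == 1 else array[i] for i in range(len(array))]
--
--     diffSolution1 = getDiff(solution1)
--     diffSolution2 = getDiff(solution2)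
--     return max(diffSolution1, diffSolution2)
-- ===== SOURCE B (Python) =====
-- def sherlockAndCost(array):
--     n = len(array)
--     if n == 1:
--         return array[0]
--     acc_even = 0
--     acc_odd = 0
--     for j, x in enumerate(array):
--         w = (1 if j > 0 else 0) + (1 if j < n - 1 else 0)
--         c = w * abs(x - 1)
--         if j % 2 == 1:
--             acc_odd += c
--         else:
--             acc_even += c
--     return max(acc_odd, acc_even)
-- ===== Notes on version B (the rewrite author's own statement) =====
-- stated objective: simpler
-- what changed: B discards A's two constructed alternating lists and the getDiff adjacent-difference passes entirely: it makes one pass over (index, value) pairs of the input, adding a closed-form boundary weight w(j) = [j>0] + [j<n-1] times |x-1| to the accumulator of j's parity class, and returns the max of the two accumulators.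
import Mathlib
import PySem

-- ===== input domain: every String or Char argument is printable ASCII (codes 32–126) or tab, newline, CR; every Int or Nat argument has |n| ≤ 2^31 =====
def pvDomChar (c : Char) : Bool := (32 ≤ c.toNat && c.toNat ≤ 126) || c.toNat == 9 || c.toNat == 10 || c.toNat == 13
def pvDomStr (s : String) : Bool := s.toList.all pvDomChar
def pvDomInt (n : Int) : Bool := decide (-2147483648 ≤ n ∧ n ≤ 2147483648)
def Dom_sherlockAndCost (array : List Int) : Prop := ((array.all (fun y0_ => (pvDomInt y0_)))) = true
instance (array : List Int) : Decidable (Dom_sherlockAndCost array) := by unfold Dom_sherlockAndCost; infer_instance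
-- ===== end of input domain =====

-- B replaces A's two constructed alternating lists and two adjacent-difference passes by one
-- pass over (index, value) pairs, adding a closed-form boundary weight w(j)·|x-1| to a
-- parity-selected accumulator (objective: simpler, no intermediate lists).

-- ===== PORT A =====
def getDiff (solution : List Int) : Int :=
  (PySem.List.pyRange 1 (solution.length : Int) 1).foldl
    (fun diff i =>
      diff + |PySem.List.pyGetD solution i 0 - PySem.List.pyGetD solution (i - 1) 0|) 0

def sherlockAndCost (array : List Int) : Int :=
  if array.length == 1 then PySem.List.pyGetD array 0 0
  else
    let solution1 := (PySem.List.pyRange 0 (array.length : Int) 1).map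
      (fun i => if i % 2 == 0 then 1 else PySem.List.pyGetD array i 0)
    let solution2 := (PySem.List.pyRange 0 (array.length : Int) 1).map
      (fun i => if i % 2 == 1 then 1 else PySem.List.pyGetD array i 0)
    let diffSolution1 := getDiff solution1
    let diffSolution2 := getDiff solution2
    max diffSolution1 diffSolution2

-- ===== PORT B =====
def sherlockAndCost_alt (array : List Int) : Int :=
  let n : Int := (array.length : Int)
  if n == 1 then PySem.List.pyGetD array 0 0
  else
    let r := (PySem.List.enumerate array 0).foldl
      (fun (st : Int × Int) (p : Int × Int) =>
        let w : Int := (if 0 < p.1 then 1 else 0) + (if p.1 < n - 1 then 1 else 0)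
        let c := w * |p.2 - 1|
        if p.1 % 2 == 1 then (st.1, st.2 + c) else (st.1 + c, st.2))
      (0, 0)
    max r.2 r.1

-- ===== PRECONDITION & SPEC =====
def Spec_sherlockAndCost (array : List Int) (out : Int) : Prop := out = sherlockAndCost_alt array
instance (array : List Int) (out : Int) : Decidable (Spec_sherlockAndCost array out) := by unfold Spec_sherlockAndCost; infer_instance

-- ===== CLAIM (what is proved, stated in full; the proofs are below) =====
def Claim_equal_sherlockAndCost : Prop := ∀ (array : List Int), Dom_sherlockAndCost array → Spec_sherlockAndCost array (sherlockAndCost array)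

-- ===== LEMMAS AND PROOFS =====

-- gap-indexed sum of |odd-position element - 1| (flag = current gap index is even)
def pvS1 : Bool → List (Int × Int) → Int
  | _, [] => 0
  | true, p :: t => |p.2 - 1| + pvS1 false t
  | false, p :: t => |p.1 - 1| + pvS1 true t

-- A's solution lists, as a recursion on the array (k = keep head?)
def pvG : Bool → List Int → List Int
  | _, [] => []
  | k, x :: t => (if k then x else 1) :: pvG (!k) t

-- sum of absolute differences of adjacent elements
def pvPairSum : List Int → Int
  | a :: b :: t => |b - a| + pvPairSum (b :: t)
  | _ => 0

-- per-index weighted sum: hl = head has a left neighbour, b = head is selected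
def pvT : Bool → Bool → List Int → Int
  | _, _, [] => 0
  | hl, b, x :: t =>
    (if b then ((if hl then 1 else 0) + (if t.isEmpty then 0 else 1)) * |x - 1| else 0)
      + pvT true (!b) t

theorem pvG_length (k : Bool) (xs : List Int) : (pvG k xs).length = xs.length := by
  induction xs generalizing k with
  | nil => rfl
  | cons x t ih => simp [pvG, ih]

theorem pvG_getElem (k : Bool) (xs : List Int) (i : Nat) (h : i < xs.length) :
    (pvG k xs)[i]'(by rw [pvG_length]; exact h) =
      if (decide (i % 2 = 0)) == k then xs[i] else 1 := by
  induction xs generalizing k i with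
  | nil => simp at h
  | cons x t ih =>
    cases i with
    | zero => cases k <;> simp [pvG]
    | succ j =>
      have hj : j < t.length := by simpa using h
      have ht := ih (!k) j hj
      rcases Nat.mod_two_eq_zero_or_one j with h0 | h1
      · have hs : (j + 1) % 2 = 1 := by omega
        cases k <;> simp only [Bool.not_false, Bool.not_true] at ht <;>
          simp [pvG, ht, h0, hs]
      · have hs : (j + 1) % 2 = 0 := by omega
        cases k <;> simp only [Bool.not_false, Bool.not_true] at ht <;>
          simp [pvG, ht, h1, hs]

theorem pv_sol1_eq (xs : List Int) :
    (PySem.List.pyRange 0 (xs.length : Int) 1).map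
      (fun i => if i % 2 == 0 then 1 else PySem.List.pyGetD xs i 0) = pvG false xs := by
  apply List.ext_getElem
  · simp [PySem.List.length_pyRange_one, pvG_length]
  · intro i h1 h2
    have hi : i < xs.length := by rwa [pvG_length] at h2
    rw [List.getElem_map, PySem.List.getElem_pyRange_one, pvG_getElem false xs i hi]
    simp only [zero_add]
    rcases Nat.mod_two_eq_zero_or_one i with h0 | hodd
    · have hz : ((i : Int)) % 2 = 0 := by omega
      simp [hz, h0]
    · have hz : ((i : Int)) % 2 = 1 := by omega
      rw [PySem.List.pyGetD_eq_getElem xs 0 (Int.natCast_nonneg _) (by exact_mod_cast hi)]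
      simp [hz, hodd]

theorem pv_sol2_eq (xs : List Int) :
    (PySem.List.pyRange 0 (xs.length : Int) 1).map
      (fun i => if i % 2 == 1 then 1 else PySem.List.pyGetD xs i 0) = pvG true xs := by
  apply List.ext_getElem
  · simp [PySem.List.length_pyRange_one, pvG_length]
  · intro i h1 h2
    have hi : i < xs.length := by rwa [pvG_length] at h2
    rw [List.getElem_map, PySem.List.getElem_pyRange_one, pvG_getElem true xs i hi]
    simp only [zero_add]
    rcases Nat.mod_two_eq_zero_or_one i with h0 | hodd
    · have hz : ((i : Int)) % 2 = 0 := by omega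
      rw [PySem.List.pyGetD_eq_getElem xs 0 (Int.natCast_nonneg _) (by exact_mod_cast hi)]
      simp [hz, h0]
    · have hz : ((i : Int)) % 2 = 1 := by omega
      simp [hz, hodd]

theorem pv_zip_sum (s : List Int) :
    ((s.zip s.tail).map (fun p : Int × Int => |p.2 - p.1|)).sum = pvPairSum s := by
  induction s with
  | nil => simp [pvPairSum]
  | cons a t ih =>
    cases t with
    | nil => simp [pvPairSum]
    | cons b t' =>
      simp only [List.tail_cons, List.zip_cons_cons, List.map_cons, List.sum_cons]
      have := ih
      simp only [List.tail_cons] at this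
      rw [this]
      rfl

theorem pv_foldl_abs (l : List Int) (g : Int → Int) (a : Int) :
    l.foldl (fun acc i => acc + g i) a = a + (l.map g).sum := by
  induction l generalizing a with
  | nil => simp
  | cons x t ih => simp [ih, add_assoc]

theorem pv_getDiff_eq_pairSum (s : List Int) : getDiff s = pvPairSum s := by
  unfold getDiff
  rw [pv_foldl_abs _ (fun i => |PySem.List.pyGetD s i 0 - PySem.List.pyGetD s (i - 1) 0|)]
  rw [zero_add]
  have hmap : (PySem.List.pyRange 1 (s.length : Int) 1).map
      (fun i => |PySem.List.pyGetD s i 0 - PySem.List.pyGetD s (i - 1) 0|) =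
      (s.zip s.tail).map (fun p : Int × Int => |p.2 - p.1|) := by
    apply List.ext_getElem
    · simp [PySem.List.length_pyRange_one]
    · intro i h1 h2
      have hlen : i + 1 < s.length := by
        simp [PySem.List.length_pyRange_one] at h1; omega
      rw [List.getElem_map, PySem.List.getElem_pyRange_one, List.getElem_map,
        List.getElem_zip]
      have e1 : PySem.List.pyGetD s ((1 : Int) + i) 0 = s[i + 1] := by
        rw [PySem.List.pyGetD_eq_getElem s 0 (by omega) (by omega)]
        congr 1
        omega
      have e2 : PySem.List.pyGetD s ((1 : Int) + i - 1) 0 = s[i]'(by omega) := by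
        rw [PySem.List.pyGetD_eq_getElem s 0 (by omega) (by omega)]
        congr 1
        omega
      rw [e1, e2, List.getElem_tail]
  rw [hmap, pv_zip_sum]

theorem pv_pairSum_g (xs : List Int) (k : Bool) :
    pvPairSum (pvG k xs) = pvS1 (!k) (xs.zip xs.tail) := by
  induction xs generalizing k with
  | nil => cases k <;> simp [pvG, pvPairSum, pvS1]
  | cons x t ih =>
    cases t with
    | nil => cases k <;> simp [pvG, pvPairSum, pvS1]
    | cons y t' =>
      have h1 := ih (!k)
      cases k <;>
        simp only [Bool.not_false, Bool.not_true, pvG, pvPairSum, pvS1,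
          List.tail_cons, List.zip_cons_cons] at h1 ⊢ <;>
        rw [h1] <;> simp [abs_sub_comm]

-- the gap-indexed sum equals the per-index weighted sum of the non-b parity class
theorem pv_S1_eq_T (xs : List Int) (b : Bool) :
    pvS1 b (xs.zip xs.tail) = pvT false (!b) xs := by
  induction xs generalizing b with
  | nil => cases b <;> simp [pvS1, pvT]
  | cons x t ih =>
    cases t with
    | nil => cases b <;> simp [pvS1, pvT]
    | cons y t' =>
      cases b
      · have h1 := ih true
        simp only [List.tail_cons, Bool.not_true] at h1
        simp only [pvS1, List.zip_cons_cons, List.tail_cons, Bool.not_false]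
        rw [h1]
        simp only [pvT, Bool.not_true, Bool.not_false, List.isEmpty_cons, if_true,
          if_false, Bool.false_eq_true]
        ring
      · have h1 := ih false
        simp only [List.tail_cons, Bool.not_false] at h1
        simp only [pvS1, List.zip_cons_cons, List.tail_cons, Bool.not_true]
        rw [h1]
        simp only [pvT, Bool.not_true, Bool.not_false, List.isEmpty_cons, if_true,
          if_false, Bool.false_eq_true]
        ring

-- B's fold step, named for the proofs (definitionally the lambda in sherlockAndCost_alt)
def pvStep (n : Int) (st : Int × Int) (p : Int × Int) : Int × Int :=
  let w : Int := (if 0 < p.1 then 1 else 0) + (if p.1 < n - 1 then 1 else 0)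
  let c := w * |p.2 - 1|
  if p.1 % 2 == 1 then (st.1, st.2 + c) else (st.1 + c, st.2)

-- B's fold, characterised: start index k >= 0, k + |t| = n
theorem pv_fold_T (n : Int) (t : List Int) (k a b : Int)
    (hk : 0 <= k) (hlen : k + t.length = n) :
    (PySem.List.enumerate t k).foldl (pvStep n) (a, b)
    = (a + pvT (decide (0 < k)) (!(k % 2 == 1)) t,
       b + pvT (decide (0 < k)) (k % 2 == 1) t) := by
  induction t generalizing k a b with
  | nil => simp [PySem.List.enumerate, pvT]
  | cons x t' ih =>
    simp only [List.length_cons] at hlen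
    push_cast at hlen
    rw [PySem.List.enumerate_cons, List.foldl_cons]
    have hc : pvStep n (a, b) (k, x) =
        if k % 2 == 1 then
          (a, b + ((if 0 < k then 1 else 0) + (if k < n - 1 then 1 else 0)) * |x - 1|)
        else
          (a + ((if 0 < k then 1 else 0) + (if k < n - 1 then 1 else 0)) * |x - 1|, b) := rfl
    have hpar : ((k + 1) % 2 == 1) = !(k % 2 == 1) := by
      rcases Int.emod_two_eq_zero_or_one k with h | h
      · have h2 : (k + 1) % 2 = 1 := by omega
        simp [h, h2]
      · have h2 : (k + 1) % 2 = 0 := by omega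
        simp [h, h2]
    have hpos : decide (0 < k + 1) = true := by simp; omega
    have hw2 : (if k < n - 1 then (1 : Int) else 0) = (if t'.isEmpty then 0 else 1) := by
      cases t' with
      | nil => simp at hlen ⊢; omega
      | cons z zs =>
        simp only [List.isEmpty_cons, if_false, List.length_cons, Bool.false_eq_true] at hlen ⊢
        rw [if_pos]
        push_cast at hlen
        omega
    rw [hc]
    by_cases hmod : k % 2 = 1
    · have hb : (k % 2 == 1) = true := by simp [hmod]
      rw [hb, if_pos rfl, ih (k + 1) _ _ (by omega) (by omega), hpar, hpos, hb]
      simp only [Bool.not_true, Bool.not_false, pvT, decide_eq_true_eq, if_true,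
        if_false, Bool.false_eq_true]
      rw [Prod.mk.injEq]
      constructor <;> (try rw [← hw2]) <;> ring
    · have hb : (k % 2 == 1) = false := by simp [hmod]
      rw [hb, if_neg (by simp), ih (k + 1) _ _ (by omega) (by omega), hpar, hpos, hb]
      simp only [Bool.not_true, Bool.not_false, pvT, decide_eq_true_eq, if_true,
        if_false, Bool.false_eq_true]
      rw [Prod.mk.injEq]
      constructor <;> (try rw [← hw2]) <;> ring

-- ===== VERDICT (by name: the statement is the Claim_ definition above) =====
theorem sherlockAndCost_spec : Claim_equal_sherlockAndCost := by
  intro array _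
  unfold Spec_sherlockAndCost sherlockAndCost sherlockAndCost_alt
  by_cases h : array.length = 1
  · simp [h]
  · have h' : ((array.length : Int) == 1) = false := by
      simp
      exact_mod_cast h
    have h'' : (array.length == 1) = false := by simp [h]
    simp only [h', h'', Bool.false_eq_true, if_false]
    have hfold := pv_fold_T (array.length : Int) array 0 0 0 le_rfl (by simp)
    rw [show ((fun (st : Int × Int) (p : Int × Int) =>
        let w : Int := (if 0 < p.1 then 1 else 0) +
          (if p.1 < (array.length : Int) - 1 then 1 else 0)
        let c := w * |p.2 - 1|
        if p.1 % 2 == 1 then (st.1, st.2 + c) else (st.1 + c, st.2)))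
      = pvStep (array.length : Int) from rfl]
    rw [hfold]
    rw [pv_sol1_eq, pv_sol2_eq, pv_getDiff_eq_pairSum, pv_getDiff_eq_pairSum,
        pv_pairSum_g, pv_pairSum_g, pv_S1_eq_T, pv_S1_eq_T]
    simp
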